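-- pv_equiv track=rewrite | github.com/NguyenThu2512/R-Python | pythonProject2/goiham.py | NegativeNumberInStrings
-- ===== SOURCE A (Python) =====
-- def NegativeNumberInStrings(s):
--     negatives=[]
--     i=0
--     for i in range(len(s)-1):
--         if all([s[i]=='-',s[i+1].isnumeric()]):
--             negative=''
--             while i+1<len(s) and s[i+1].isnumeric():
--                 negative+=s[i+1]
--                 i+=1
--             else:
--                 negatives+=[-int(negative)]
--
--     return negatives
-- ===== SOURCE B (Python) =====
-- def NegativeNumberInStrings(s):
--     # Scan maximal numeric runs left-to-right and look back one char for '-'.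
--     # 'rest' is the remaining suffix, kept as a reversed stack so pop() is O(1).
--     res = []
--     prev = ''
--     rest = list(s)[::-1]
--     while rest:
--         c = rest.pop()
--         if c.isnumeric():
--             run = c
--             while rest and rest[-1].isnumeric():
--                 run += rest.pop()
--             if prev == '-':
--                 res.append(-int(run))
--             prev = run[-1]
--         else:
--             prev = c
--     return res
-- ===== Notes on version B (the rewrite author's own statement) =====
-- stated objective: faster
-- what changed: B replaces A's index loop that anchors on each minus sign and re-walks every digit of the following run at each position by a single pass over maximal numeric runs with a one-character look-back for a minus sign.
import Mathlib
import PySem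

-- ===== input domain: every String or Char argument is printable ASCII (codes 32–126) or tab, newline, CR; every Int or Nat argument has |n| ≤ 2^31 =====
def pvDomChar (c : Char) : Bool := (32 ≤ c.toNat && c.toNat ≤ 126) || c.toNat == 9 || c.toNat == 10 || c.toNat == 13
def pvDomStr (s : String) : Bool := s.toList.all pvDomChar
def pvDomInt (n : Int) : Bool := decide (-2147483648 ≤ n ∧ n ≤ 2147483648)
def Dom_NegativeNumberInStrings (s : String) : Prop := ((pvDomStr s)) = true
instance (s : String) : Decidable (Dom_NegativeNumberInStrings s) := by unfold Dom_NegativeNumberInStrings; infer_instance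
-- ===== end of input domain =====

-- B scans maximal numeric runs with a one-char look-back for a minus sign instead of A's anchor-on-minus forward scan (each run walked once); return values proved equal on Dom.

-- ===== PORT A =====
-- int(negative): hand port of int() on the nonempty all-digit strings A feeds it (exact there).
def digitsInt (cs : List Char) : Int :=
  cs.foldl (fun a c => a * 10 + ((c.toNat : Int) - 48)) 0

-- inner 'while i+1<len(s) and s[i+1].isnumeric(): negative+=s[i+1]; i+=1' (index always in range when read).
-- .isnumeric() is ported as PySem.Chars.isdigit, exact on the printable-ASCII domain.
def collectA (l : List Char) (i : Nat) (negative : List Char) : List Char :=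
  if i + 1 < l.length ∧ PySem.Chars.isdigit (PySem.List.pyGetD l ((i : Int) + 1) ' ') = true then
    collectA l (i + 1) (negative ++ [PySem.List.pyGetD l ((i : Int) + 1) ' '])
  else negative
termination_by l.length - i
decreasing_by omega

def NegativeNumberInStrings (s : String) : List Int :=
  let l := s.toList
  -- for i in range(len(s)-1): indices are in range wherever read
  (List.range (l.length - 1)).foldl
    (fun (negatives : List Int) (i : Nat) =>
      if (PySem.List.pyGetD l (i : Int) ' ' == '-') && PySem.Chars.isdigit (PySem.List.pyGetD l ((i : Int) + 1) ' ') then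
        -- the while's else: clause always runs (no break)
        negatives ++ [-(digitsInt (collectA l i []))]
      else negatives) []

-- ===== PORT B =====
-- Python B's 'prev' is a one-char-or-empty string, ported as Option Char (none = empty); its reversed
-- stack 'rest' is modelled as the remaining suffix (pop = take head, the inner pop-while = takeWhile/dropWhile).
def altGo (res : List Int) (prev : Option Char) (rest : List Char) : List Int :=
  match rest with
  | [] => res
  | c :: t =>
    if PySem.Chars.isdigit c then
      let run := c :: t.takeWhile PySem.Chars.isdigit
      let res' := if prev == some '-' then res ++ [-(digitsInt run)] else res
      altGo res' (some (run.getLast (by simp [run]))) (t.dropWhile PySem.Chars.isdigit)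
    else altGo res (some c) t
termination_by rest.length
decreasing_by
  · simpa using Nat.lt_succ_of_le (List.length_dropWhile_le _ _)
  · simp

def NegativeNumberInStrings_alt (s : String) : List Int :=
  altGo [] none s.toList

-- ===== PRECONDITION & SPEC =====
def Spec_NegativeNumberInStrings (s : String) (out : List Int) : Prop := out = NegativeNumberInStrings_alt s
instance (s : String) (out : List Int) : Decidable (Spec_NegativeNumberInStrings s out) := by unfold Spec_NegativeNumberInStrings; infer_instance

-- ===== CLAIM (what is proved, stated in full; the proofs are below) =====
def Claim_equal_NegativeNumberInStrings : Prop := ∀ (s : String), Dom_NegativeNumberInStrings s → Spec_NegativeNumberInStrings s (NegativeNumberInStrings s)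

-- ===== LEMMAS AND PROOFS =====

-- common recursive characterisation: at each position with a next char, emit iff '-' followed by a digit
def aspec : List Char → List Int
  | [] => []
  | [_] => []
  | c :: d :: t =>
    (if (c == '-') && PySem.Chars.isdigit d then
      [-(digitsInt ((d :: t).takeWhile PySem.Chars.isdigit))] else []) ++ aspec (d :: t)

lemma isdigit_ne_dash {c : Char} (h : PySem.Chars.isdigit c = true) : (c == '-') = false := by
  by_cases hc : c = '-'
  · subst hc; simp [PySem.Chars.isdigit] at h
  · simp [hc]

lemma collectA_eq (l : List Char) (i : Nat) (acc : List Char) :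
    collectA l i acc = acc ++ (l.drop (i + 1)).takeWhile PySem.Chars.isdigit := by
  rw [collectA]
  by_cases h : i + 1 < l.length ∧ PySem.Chars.isdigit (PySem.List.pyGetD l ((i : Int) + 1) ' ') = true
  · rw [if_pos h]
    obtain ⟨h1, h2⟩ := h
    have hcast : ((i : Int) + 1) = ((i + 1 : Nat) : Int) := by push_cast; ring
    rw [hcast, PySem.List.pyGetD_natCast] at h2 ⊢
    have hd : l.drop (i + 1) = l[i + 1] :: l.drop (i + 2) := List.drop_eq_getElem_cons h1
    have hg : l.getD (i + 1) ' ' = l[i + 1] := List.getD_eq_getElem l ' ' h1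
    rw [collectA_eq l (i + 1) _, hd, hg,
      List.takeWhile_cons_of_pos (by rw [← hg]; exact h2)]
    simp
  · rw [if_neg h]
    rw [not_and] at h
    by_cases h1 : i + 1 < l.length
    · have h2 := h h1
      have hcast : ((i : Int) + 1) = ((i + 1 : Nat) : Int) := by push_cast; ring
      rw [hcast, PySem.List.pyGetD_natCast] at h2
      have hd : l.drop (i + 1) = l[i + 1] :: l.drop (i + 2) := List.drop_eq_getElem_cons h1
      have hg : l.getD (i + 1) ' ' = l[i + 1] := List.getD_eq_getElem l ' ' h1
      rw [hd, List.takeWhile_cons_of_neg (by rw [← hg]; simpa using h2)]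
      simp
    · rw [List.drop_eq_nil_of_le (by omega)]
      simp
termination_by l.length - i
decreasing_by omega

-- A's filtered-index form equals aspec
lemma A_eq_aspec (l : List Char) :
    ((List.range (l.length - 1)).filter
      (fun (i : Nat) => (PySem.List.pyGetD l (i : Int) ' ' == '-') && PySem.Chars.isdigit (PySem.List.pyGetD l ((i : Int) + 1) ' '))).map
      (fun (i : Nat) => -(digitsInt (collectA l i []))) = aspec l := by
  match l with
  | [] => rfl
  | [c] => rfl
  | c :: d :: t =>
    have hlen : (c :: d :: t).length - 1 = t.length + 1 := by simp
    have h0p : ((PySem.List.pyGetD (c :: d :: t) ((0 : Nat) : Int) ' ' == '-') &&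
        PySem.Chars.isdigit (PySem.List.pyGetD (c :: d :: t) (((0 : Nat) : Int) + 1) ' '))
        = ((c == '-') && PySem.Chars.isdigit d) := by
      simp [PySem.List.pyGetD]
    have hshift :
        ((List.filter
            ((fun (i : Nat) => (PySem.List.pyGetD (c :: d :: t) (i : Int) ' ' == '-') &&
              PySem.Chars.isdigit (PySem.List.pyGetD (c :: d :: t) ((i : Int) + 1) ' ')) ∘ Nat.succ)
            (List.range t.length)).map
          ((fun (i : Nat) => -(digitsInt (collectA (c :: d :: t) i []))) ∘ Nat.succ))
          = aspec (d :: t) := by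
      rw [← A_eq_aspec (d :: t)]
      have hp : ∀ i : Nat,
          ((fun (i : Nat) => (PySem.List.pyGetD (c :: d :: t) (i : Int) ' ' == '-') &&
            PySem.Chars.isdigit (PySem.List.pyGetD (c :: d :: t) ((i : Int) + 1) ' ')) ∘ Nat.succ) i
          = ((PySem.List.pyGetD (d :: t) (i : Int) ' ' == '-') &&
            PySem.Chars.isdigit (PySem.List.pyGetD (d :: t) ((i : Int) + 1) ' ')) := by
        intro i
        have h1 : ((Nat.succ i : Nat) : Int) = (i : Int) + 1 := by push_cast; ring
        simp only [Function.comp, h1]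
        have h2 : ((i : Int) + 1 + 1) = ((i + 2 : Nat) : Int) := by push_cast; ring
        have h3 : ((i : Int) + 1) = ((i + 1 : Nat) : Int) := by push_cast; ring
        rw [h2, h3, PySem.List.pyGetD_natCast, PySem.List.pyGetD_natCast,
          PySem.List.pyGetD_natCast, PySem.List.pyGetD_natCast]
        simp [List.getD]
      have hg : ∀ i : Nat,
          ((fun (i : Nat) => -(digitsInt (collectA (c :: d :: t) i []))) ∘ Nat.succ) i
          = -(digitsInt (collectA (d :: t) i [])) := by
        intro i
        simp only [Function.comp, collectA_eq, List.nil_append]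
        rfl
      simp only [List.filter_congr (fun i _ => hp i)]
      exact List.map_congr_left (fun i _ => hg i)
    have haspec : aspec (c :: d :: t) = (if (c == '-') && PySem.Chars.isdigit d then
        [-(digitsInt ((d :: t).takeWhile PySem.Chars.isdigit))] else []) ++ aspec (d :: t) := rfl
    rw [hlen, List.range_succ_eq_map, List.filter_cons, h0p, haspec]
    by_cases hc : ((c == '-') && PySem.Chars.isdigit d) = true
    · rw [if_pos hc, if_pos hc, List.map_cons, List.filter_map, List.map_map, hshift]
      rw [collectA_eq]
      rfl
    · rw [if_neg hc, if_neg hc, List.filter_map, List.map_map, hshift]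
      rfl

-- aspec ignores a leading digit run (a digit is never '-')
lemma aspec_dropWhile : ∀ (t : List Char) (c : Char), PySem.Chars.isdigit c = true →
    aspec (c :: t) = aspec (t.dropWhile PySem.Chars.isdigit)
  | [], c, _ => rfl
  | d :: u, c, hc => by
    rw [show aspec (c :: d :: u) = (if (c == '-') && PySem.Chars.isdigit d then
      [-(digitsInt ((d :: u).takeWhile PySem.Chars.isdigit))] else []) ++ aspec (d :: u) from rfl]
    rw [isdigit_ne_dash hc]
    simp only [Bool.false_and, if_false, List.nil_append, Bool.false_eq_true]
    by_cases hd : PySem.Chars.isdigit d = true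
    · rw [aspec_dropWhile u d hd, List.dropWhile_cons_of_pos hd]
    · rw [List.dropWhile_cons_of_neg (by simpa using hd)]

lemma dropWhile_head_false {p : Char → Bool} {t : List Char} {c : Char} {u : List Char}
    (h : t.dropWhile p = c :: u) : p c = false := by
  induction t with
  | nil => simp at h
  | cons a t ih =>
    by_cases ha : p a = true
    · rw [List.dropWhile_cons_of_pos ha] at h; exact ih h
    · rw [List.dropWhile_cons_of_neg (by simpa using ha)] at h
      cases h; simpa using ha

-- B's loop equals aspec plus a pending look-back at the boundary
def midTerm (prev : Option Char) (rest : List Char) : List Int :=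
  match rest with
  | [] => []
  | c :: t => if (prev == some '-') && PySem.Chars.isdigit c then
      [-(digitsInt (c :: t.takeWhile PySem.Chars.isdigit))] else []

lemma midTerm_dropWhile (prev : Option Char) (t : List Char) :
    midTerm prev (t.dropWhile PySem.Chars.isdigit) = [] := by
  cases hdw : t.dropWhile PySem.Chars.isdigit with
  | nil => rfl
  | cons c u => simp [midTerm, dropWhile_head_false hdw]

lemma altGo_eq (rest : List Char) (prev : Option Char) (res : List Int) :
    altGo res prev rest = res ++ midTerm prev rest ++ aspec rest := by
  match rest with
  | [] => simp [altGo, aspec, midTerm]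
  | c :: t =>
    rw [altGo]
    by_cases hc : PySem.Chars.isdigit c = true
    · simp only [hc, if_true]
      rw [altGo_eq (t.dropWhile PySem.Chars.isdigit) _ _, midTerm_dropWhile,
        ← aspec_dropWhile t c hc]
      have hmt : midTerm prev (c :: t) = (if (prev == some '-') = true then
          [-(digitsInt (c :: t.takeWhile PySem.Chars.isdigit))] else []) := by
        simp [midTerm, hc]
      rw [hmt]
      by_cases hp : (prev == some '-') = true
      · simp [hp]
      · simp [hp]
    · simp only [hc, Bool.false_eq_true, if_false]
      rw [altGo_eq t (some c) res]
      have hmt0 : midTerm prev (c :: t) = [] := by simp [midTerm, hc]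
      rw [hmt0, List.append_nil]
      have htail : midTerm (some c) t ++ aspec t = aspec (c :: t) := by
        cases t with
        | nil => rfl
        | cons d u =>
          have haspec : aspec (c :: d :: u) = (if (c == '-') && PySem.Chars.isdigit d then
              [-(digitsInt ((d :: u).takeWhile PySem.Chars.isdigit))] else []) ++ aspec (d :: u) := rfl
          have hbeq : (some c == some '-') = (c == '-') := by
            by_cases h : c = '-' <;> simp [h]
          rw [haspec]
          by_cases hd : PySem.Chars.isdigit d = true
          · rw [List.takeWhile_cons_of_pos hd]
            simp [midTerm, hbeq, hd]
          · simp [midTerm, hbeq, hd]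
      rw [List.append_assoc, htail]
termination_by rest.length
decreasing_by
  · simpa using Nat.lt_succ_of_le (List.length_dropWhile_le _ _)
  · simp

lemma A_foldl (l : List Char) :
    (List.range (l.length - 1)).foldl
      (fun (negatives : List Int) (i : Nat) =>
        if (PySem.List.pyGetD l (i : Int) ' ' == '-') && PySem.Chars.isdigit (PySem.List.pyGetD l ((i : Int) + 1) ' ') then
          negatives ++ [-(digitsInt (collectA l i []))]
        else negatives) []
    = ((List.range (l.length - 1)).filter
        (fun (i : Nat) => (PySem.List.pyGetD l (i : Int) ' ' == '-') && PySem.Chars.isdigit (PySem.List.pyGetD l ((i : Int) + 1) ' '))).map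
        (fun (i : Nat) => -(digitsInt (collectA l i []))) := by
  rw [PySem.List.foldl_append_if]
  simp

-- ===== VERDICT (by name: the statement is the Claim_ definition above) =====
theorem NegativeNumberInStrings_spec : Claim_equal_NegativeNumberInStrings := by
  intro s _
  show NegativeNumberInStrings s = NegativeNumberInStrings_alt s
  rw [NegativeNumberInStrings, NegativeNumberInStrings_alt, altGo_eq]
  have hmid : midTerm none s.toList = [] := by
    cases s.toList <;> simp [midTerm]
  rw [hmid, List.nil_append, List.nil_append, ← A_eq_aspec, A_foldl]
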